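-- pv_equiv track=rewrite | github.com/dd2003-460/from-motivation-to-society | final_format_refine.py | refine_paragraph_spacing
-- ===== SOURCE A (Python) =====
-- def refine_paragraph_spacing(content):
--     """优化段落间距"""
--     lines = content.split('\n')
--     new_lines = []
--
--     for i, line in enumerate(lines):
--         new_lines.append(line)
--
--         # 在主要环境前后添加空行
--         if (line.strip().startswith(r'\begin{') and
--             any(env in line for env in ['motivation', 'logicmap', 'questionbox', 'readingnote'])):
--             if i + 1 < len(lines) and not lines[i + 1].strip():
--                 new_lines.append('')
--
--         if (line.strip().startswith(r'\end{') and
--             any(env in line for env in ['motivation', 'logicmap', 'questionbox', 'readingnote'])):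
--             if i + 1 < len(lines) and lines[i + 1].strip():
--                 new_lines.append('')
--
--     return '\n'.join(new_lines)
-- ===== SOURCE B (Python) =====
-- def refine_paragraph_spacing(content):
--     """优化段落间距 — single look-behind pass: remember whether the previous line
--     opened or closed a major environment instead of peeking at lines[i+1]."""
--     ENVS = ('motivation', 'logicmap', 'questionbox', 'readingnote')
--     out = []
--     prev = 0  # 0: ordinary line, 1: previous line was \begin{env}, 2: previous was \end{env}
--     for line in content.split('\n'):
--         if prev == 1 and not line.strip():
--             out.append('')
--         elif prev == 2 and line.strip():
--             out.append('')
--         out.append(line)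
--         stripped = line.strip()
--         if stripped.startswith('\\begin{') and any(e in line for e in ENVS):
--             prev = 1
--         elif stripped.startswith('\\end{') and any(e in line for e in ENVS):
--             prev = 2
--         else:
--             prev = 0
--     return '\n'.join(out)
-- ===== Notes on version B (the rewrite author's own statement) =====
-- stated objective: alternative
-- what changed: Replaced the look-ahead pass that indexes lines[i+1] from an enumerated list with a look-behind single pass that carries a flag saying whether the previous line opened or closed a major environment.
import Mathlib
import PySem

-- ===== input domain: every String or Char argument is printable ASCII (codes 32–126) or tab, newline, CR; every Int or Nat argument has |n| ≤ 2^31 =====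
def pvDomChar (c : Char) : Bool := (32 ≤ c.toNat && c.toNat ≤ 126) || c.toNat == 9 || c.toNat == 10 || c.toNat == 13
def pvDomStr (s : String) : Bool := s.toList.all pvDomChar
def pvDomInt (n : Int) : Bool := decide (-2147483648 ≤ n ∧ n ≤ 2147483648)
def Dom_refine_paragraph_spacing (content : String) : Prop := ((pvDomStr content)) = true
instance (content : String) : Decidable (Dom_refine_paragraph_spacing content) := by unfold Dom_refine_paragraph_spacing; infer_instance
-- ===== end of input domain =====

-- B replaces A's look-ahead pass (indexing lines[i+1]) with a look-behind pass carrying a flag about the previous line; same output, same cost.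

-- shared predicates (the two Pythons test the identical conditions on a line)
def pvEnvAny (line : String) : Bool :=
  PySem.Str.isIn "motivation" line || PySem.Str.isIn "logicmap" line ||
  PySem.Str.isIn "questionbox" line || PySem.Str.isIn "readingnote" line

def pvBeginEnv (line : String) : Bool :=
  PySem.Str.startswith (PySem.Str.strip line) "\\begin{" && pvEnvAny line

def pvEndEnv (line : String) : Bool :=
  PySem.Str.startswith (PySem.Str.strip line) "\\end{" && pvEnvAny line

def pvBlank (line : String) : Bool := PySem.Str.strip line == ""

-- ===== PORT A =====
-- A's loop body: append line; two independent look-ahead checks on lines[i+1] (guarded by i+1 < len(lines))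
def pvStepA (lines : List String) (acc : List String) (p : Int × String) : List String :=
  let acc1 := acc ++ [p.2]
  let acc2 := if pvBeginEnv p.2 && decide (p.1 + 1 < (lines.length : Int)) &&
                 pvBlank (PySem.List.pyGetD lines (p.1 + 1) "") then acc1 ++ [""] else acc1
  if pvEndEnv p.2 && decide (p.1 + 1 < (lines.length : Int)) &&
     !pvBlank (PySem.List.pyGetD lines (p.1 + 1) "") then acc2 ++ [""] else acc2

-- content.split('\n'): split? is always `some` for the non-empty separator "\n"; .getD [] only discharges the Option
def refine_paragraph_spacing (content : String) : String :=
  let lines := (PySem.Str.split? content "\n").getD []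
  let new_lines := (PySem.List.enumerate lines).foldl (pvStepA lines) []
  PySem.Str.join "\n" new_lines

-- ===== PORT B =====
def pvKindOf (line : String) : Int :=
  if pvBeginEnv line then 1 else if pvEndEnv line then 2 else 0

-- B's loop body: maybe emit a blank from the remembered flag, append the line, update the flag
def pvStepB (st : List String × Int) (line : String) : List String × Int :=
  let acc := if st.2 == 1 && pvBlank line then st.1 ++ [""]
             else if st.2 == 2 && !pvBlank line then st.1 ++ [""]
             else st.1
  (acc ++ [line], pvKindOf line)

def refine_paragraph_spacing_alt (content : String) : String :=
  PySem.Str.join "\n" ((((PySem.Str.split? content "\n").getD []).foldl pvStepB ([], 0)).1)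

-- ===== PRECONDITION & SPEC =====
def Spec_refine_paragraph_spacing (content : String) (out : String) : Prop := out = refine_paragraph_spacing_alt content
instance (content : String) (out : String) : Decidable (Spec_refine_paragraph_spacing content out) := by unfold Spec_refine_paragraph_spacing; infer_instance

-- ===== CLAIM (what is proved, stated in full; the proofs are below) =====
def Claim_equal_refine_paragraph_spacing : Prop := ∀ (content : String), Dom_refine_paragraph_spacing content → Spec_refine_paragraph_spacing content (refine_paragraph_spacing content)

-- ===== LEMMAS AND PROOFS =====

-- a (stripped) line cannot start with both "\begin{" and "\end{"
lemma pvBegin_end_excl (l : String) : pvBeginEnv l = true → pvEndEnv l = false := by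
  intro h
  by_contra hq
  rw [Bool.not_eq_false] at hq
  unfold pvBeginEnv at h
  unfold pvEndEnv at hq
  simp only [Bool.and_eq_true, PySem.Str.startswith_eq] at h hq
  have hb := (PySem.Chars.startswith_iff _ _).mp h.1
  have he := (PySem.Chars.startswith_iff _ _).mp hq.1
  have := List.prefix_or_prefix_of_prefix hb he
  revert this
  decide

-- reference form of A's output on the tail of the line list
def pvAuxA : List String → List String
  | [] => []
  | [l] => [l]
  | l :: l' :: rest =>
      l :: (((if pvBeginEnv l && pvBlank l' then [""] else []) ++
             (if pvEndEnv l && !pvBlank l' then [""] else [])) ++ pvAuxA (l' :: rest))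

-- reference form of B's output given the carried flag
def pvAuxB : Int → List String → List String
  | _, [] => []
  | k, l :: rest =>
      (if k == 1 && pvBlank l then [""] else if k == 2 && !pvBlank l then [""] else []) ++
      l :: pvAuxB (pvKindOf l) rest

lemma pvFoldB_eq (rest : List String) : ∀ (acc : List String) (k : Int),
    (rest.foldl pvStepB (acc, k)).1 = acc ++ pvAuxB k rest := by
  induction rest with
  | nil => intro acc k; simp [pvAuxB]
  | cons l rest ih =>
      intro acc k
      simp only [List.foldl_cons, pvStepB, pvAuxB]
      rw [ih]
      by_cases h1 : (k == 1 && pvBlank l) = true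
      · simp [h1]
      · by_cases h2 : (k == 2 && !pvBlank l) = true
        · simp [h1, h2]
        · simp [h1, h2]

lemma pvFoldA_eq (lines : List String) : ∀ (suffix : List String) (k : Nat) (acc : List String),
    lines.drop k = suffix →
    (PySem.List.enumerate suffix (k : Int)).foldl (pvStepA lines) acc = acc ++ pvAuxA suffix := by
  intro suffix
  induction suffix with
  | nil => intro k acc _; simp [PySem.List.enumerate_nil, pvAuxA]
  | cons l rest ih =>
      intro k acc hdrop
      have hk : k < lines.length := by
        by_contra hgt
        rw [List.drop_eq_nil_of_le (by omega)] at hdrop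
        exact (List.cons_ne_nil l rest) hdrop.symm
      have hlen : lines.length = k + 1 + rest.length := by
        have h2 := congrArg List.length hdrop
        simp [List.length_drop] at h2
        omega
      have hdrop1 : lines.drop (k + 1) = rest := by
        rw [← List.tail_drop, hdrop]
        rfl
      have hlt : decide ((k : Int) + 1 < (lines.length : Int)) = decide (rest ≠ []) := by
        rw [decide_eq_decide]
        constructor
        · intro h hnil
          subst hnil
          simp at hlen
          omega
        · intro h
          have hpos : 0 < rest.length := List.length_pos_iff.mpr h
          omega
      have hget : PySem.List.pyGetD lines ((k : Int) + 1) "" = rest.headD "" := by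
        have hc : ((k : Int) + 1) = ((k + 1 : Nat) : Int) := by push_cast; ring
        rw [hc, PySem.List.pyGetD_natCast]
        rcases hr : rest with _ | ⟨l', rest'⟩
        · rw [List.getD_eq_default]
          · rfl
          · rw [hr] at hlen; simp at hlen; omega
        · have hidx : lines[k + 1]? = some l' := by
            have h0 := List.getElem?_drop (xs := lines) (i := k + 1) (j := 0)
            rw [hdrop1, hr] at h0
            simpa using h0.symm
          simp [List.getD, hidx]
      have hstep : pvStepA lines acc ((k : Int), l) =
          acc ++ ([l] ++
            (if pvBeginEnv l && decide (rest ≠ []) && pvBlank (rest.headD "") then [""] else []) ++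
            (if pvEndEnv l && decide (rest ≠ []) && !pvBlank (rest.headD "") then [""] else [])) := by
        unfold pvStepA
        simp only
        rw [hlt, hget]
        split_ifs <;> simp
      rw [PySem.List.enumerate_cons, List.foldl_cons, hstep]
      rcases rest with _ | ⟨l', rest'⟩
      · simp [PySem.List.enumerate_nil, pvAuxA]
      · have hc : ((k : Int) + 1) = ((k + 1 : Nat) : Int) := by push_cast; ring
        rw [hc, ih (k + 1) _ hdrop1]
        simp [pvAuxA]

lemma pvAuxA_eq_auxB : ∀ (rest : List String) (l : String),
    pvAuxA (l :: rest) = l :: pvAuxB (pvKindOf l) rest := by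
  intro rest
  induction rest with
  | nil => intro l; simp [pvAuxA, pvAuxB]
  | cons l' rest ih =>
      intro l
      rw [pvAuxA, ih l']
      simp only [pvAuxB]
      have hsep : ((if pvBeginEnv l && pvBlank l' then [""] else []) ++
            (if pvEndEnv l && !pvBlank l' then ([""] : List String) else [])) =
          (if pvKindOf l == 1 && pvBlank l' then [""]
           else if pvKindOf l == 2 && !pvBlank l' then [""] else []) := by
        unfold pvKindOf
        by_cases hb : pvBeginEnv l = true
        · have he := pvBegin_end_excl l hb
          cases hk : pvBlank l' <;> simp [hb, he]
        · rw [Bool.not_eq_true] at hb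
          by_cases he : pvEndEnv l = true
          · cases hk : pvBlank l' <;> simp [hb, he]
          · rw [Bool.not_eq_true] at he
            cases hk : pvBlank l' <;> simp [hb, he]
      rw [hsep]

-- ===== VERDICT (by name: the statement is the Claim_ definition above) =====
theorem refine_paragraph_spacing_spec : Claim_equal_refine_paragraph_spacing := by
  intro content _
  unfold Spec_refine_paragraph_spacing
  simp only [refine_paragraph_spacing, refine_paragraph_spacing_alt]
  generalize (PySem.Str.split? content "\n").getD [] = lines
  have hA := pvFoldA_eq lines lines 0 [] (by simp)
  simp only [Int.natCast_zero] at hA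
  rw [hA, pvFoldB_eq lines [] 0]
  rcases lines with _ | ⟨l, rest⟩
  · simp [pvAuxA, pvAuxB]
  · rw [List.nil_append, List.nil_append, pvAuxA_eq_auxB]
    simp [pvAuxB, pvKindOf]
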